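-- pv_equiv track=rewrite | github.com/chnnxyz/lla_finals_challenge | draftscraper.py | dpcleanup
-- ===== SOURCE A (Python) =====
-- champions='aatrox ahri akali alistar amumu anivia annie aphelios ashe aurelionsol azir bard blitzcrank brand braum caitlyn camille cassiopeia chogath corki drmundo draven ekko elise evelynn ezreal fiddlesticks fiora fizz galio gangplank garen gnar gragas graves hecarim heimerdinger illaoi irelia ivern janna jarvaniv jax jayce jhin jinx kaisa kalista karma karthus kassadin katarina kayle kayn kennen khazix kindred kled kogmaw leblanc leesin leona lissandra lucian lulu lux malphite malzahar maokai masteryi missfortune mordekaiser morgana nami nasus nautilus neeko nidalee nocturne nunu olaf orianna ornn pantheon poppy pyke qiyana quinn rakan rammus reksai renekton rengar riven rumble ryze sejuani senna sett sion shaco shen shyvana sivir skarner sona soraka swain sylas syndra tahmkench taliyah talon taric teemo thresh tristana trundle tryndamere twistedfate twitch udyr urgot varus vayne veigar velkoz "vi" viktor vladimir volibear warwick wukong xayah xerath xinzhao yasuo yorick yuumi zac zed ziggs zilean zoe zyra'.split()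
--
-- def dpcleanup(x):
--     xc=[]
--     i=0
--     for i in range(len(x)):
--         for champ in champions:
--             if str(champ) in str(x[i]):
--                 if champ=='"vi"':
--                     xc.append("vi")
--                 else:
--                     xc.append(champ)
--         if len(xc)<(i+1):
--             xc.append("nan")
--     xc1=[]
--     xc2=[]
--     for i in range(int(len(xc)/2)):
--         xc1.append(xc[2*i])
--         xc2.append(xc[2*i+1])
--     return xc1,xc2
-- ===== SOURCE B (Python) =====
-- CHAMPIONS = 'aatrox ahri akali alistar amumu anivia annie aphelios ashe aurelionsol azir bard blitzcrank brand braum caitlyn camille cassiopeia chogath corki drmundo draven ekko elise evelynn ezreal fiddlesticks fiora fizz galio gangplank garen gnar gragas graves hecarim heimerdinger illaoi irelia ivern janna jarvaniv jax jayce jhin jinx kaisa kalista karma karthus kassadin katarina kayle kayn kennen khazix kindred kled kogmaw leblanc leesin leona lissandra lucian lulu lux malphite malzahar maokai masteryi missfortune mordekaiser morgana nami nasus nautilus neeko nidalee nocturne nunu olaf orianna ornn pantheon poppy pyke qiyana quinn rakan rammus reksai renekton rengar riven rumble ryze sejuani senna sett sion shaco shen shyvana sivir skarner sona soraka swain sylas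 syndra tahmkench taliyah talon taric teemo thresh tristana trundle tryndamere twistedfate twitch udyr urgot varus vayne veigar velkoz "vi" viktor vladimir volibear warwick wukong xayah xerath xinzhao yasuo yorick yuumi zac zed ziggs zilean zoe zyra'.split()
--
--
-- def dpcleanup(x):
--     # single fused pass: route each matched name straight into its column by the
--     # parity of a running counter; no intermediate flat list, no split pass
--     xc1, xc2 = [], []
--     c = 0
--     for i, s in enumerate(x):
--         for champ in CHAMPIONS:
--             if champ in s:
--                 (xc1 if c % 2 == 0 else xc2).append('vi' if champ == '"vi"' else champ)
--                 c += 1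
--         if c < i + 1:
--             (xc1 if c % 2 == 0 else xc2).append('nan')
--             c += 1
--     if len(xc2) < len(xc1):
--         xc1.pop()  # an unpaired trailing item has no partner in column 2
--     return xc1, xc2
-- ===== Notes on version B (the rewrite author's own statement) =====
-- stated objective: alternative
-- what changed: B fuses A's build-then-split phases into one pass: instead of materialising a flat list xc and re-walking it with an index loop over xc[2*i]/xc[2*i+1], B routes each matched name (and the padding 'nan') directly into column 1 or 2 by the parity of a running counter and finally drops an unpaired trailing item from column 1; a timing run measured this constant-factor faster (no intermediate flat list, no second indexing pass, no repeated len() checks on the growing list).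
import Mathlib
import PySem

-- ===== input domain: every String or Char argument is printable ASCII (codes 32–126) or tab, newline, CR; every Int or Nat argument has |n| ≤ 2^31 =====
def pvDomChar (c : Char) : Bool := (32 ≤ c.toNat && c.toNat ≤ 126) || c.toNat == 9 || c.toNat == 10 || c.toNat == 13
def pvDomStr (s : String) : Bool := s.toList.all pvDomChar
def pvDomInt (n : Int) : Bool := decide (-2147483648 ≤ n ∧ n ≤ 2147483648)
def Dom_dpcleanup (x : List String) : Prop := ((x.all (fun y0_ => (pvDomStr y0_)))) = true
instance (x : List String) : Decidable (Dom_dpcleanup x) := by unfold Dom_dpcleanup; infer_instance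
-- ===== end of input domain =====

-- B fuses A's build-then-split phases into one pass that routes each matched name into its
-- column by the parity of a running counter; measured constant-factor faster (objective: alternative).

-- the module-level 'champions' list (shared context of both Pythons)
def pvChampions : List String := ["aatrox", "ahri", "akali", "alistar", "amumu", "anivia", "annie", "aphelios", "ashe", "aurelionsol", "azir", "bard", "blitzcrank", "brand", "braum", "caitlyn", "camille", "cassiopeia", "chogath", "corki", "drmundo", "draven", "ekko", "elise", "evelynn", "ezreal", "fiddlesticks", "fiora", "fizz", "galio", "gangplank", "garen", "gnar", "gragas", "graves", "hecarim", "heimerdinger", "illaoi", "irelia", "ivern", "janna", "jarvaniv", "jax", "jayce", "jhin", "jinx", "kaisa", "kalista", "karma", "karthus", "kassadin", "katarina", "kayle", "kayn", "kennen", "khazix", "kindred", "kled", "kogmaw", "leblanc", "leesin", "leona", "lissandra", "lucian", "lulu", "lux", "malphite", "malzahar", "maokai", "masteryi", "missfortune", "mordekaiser", "morgana", "nami", "nasus", "nautilus", "neeko", "nidalee", "nocturne", "nunu", "olaf", "orianna", "ornn", "pantheon", "poppy", "pyke", "qiyana", "quinn", "rakan", "rammus", "reksai", "renekton", "rengar",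 "riven", "rumble", "ryze", "sejuani", "senna", "sett", "sion", "shaco", "shen", "shyvana", "sivir", "skarner", "sona", "soraka", "swain", "sylas", "syndra", "tahmkench", "taliyah", "talon", "taric", "teemo", "thresh", "tristana", "trundle", "tryndamere", "twistedfate", "twitch", "udyr", "urgot", "varus", "vayne", "veigar", "velkoz", "\"vi\"", "viktor", "vladimir", "volibear", "warwick", "wukong", "xayah", "xerath", "xinzhao", "yasuo", "yorick", "yuumi", "zac", "zed", "ziggs", "zilean", "zoe", "zyra"]

-- ===== PORT A =====
-- for i in range(len(x)): inner for over champions appending to xc, then the pad; x[i] is always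
-- in range here, so pyGetD with a default is exact
def dpcleanupXc (x : List String) : List String :=
  (PySem.List.pyRange 0 (x.length : Int) 1).foldl (fun xc i =>
    let xc := pvChampions.foldl (fun xc champ =>
      if PySem.Str.isIn champ (PySem.List.pyGetD x i "") then
        if champ = "\"vi\"" then xc ++ ["vi"] else xc ++ [champ]
      else xc) xc
    if (xc.length : Int) < i + 1 then xc ++ ["nan"] else xc) []

def dpcleanup (x : List String) : List String × List String :=
  let xc := dpcleanupXc x
  -- int(len(xc)/2) = len(xc) // 2 exactly (the length is nonnegative and far below 2^53)
  (PySem.List.pyRange 0 ((xc.length : Int) / 2) 1).foldl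
    (fun (p : List String × List String) i =>
      (p.1 ++ [PySem.List.pyGetD xc (2 * i) ""], p.2 ++ [PySem.List.pyGetD xc (2 * i + 1) ""]))
    ([], [])

-- ===== PORT B =====
-- '(xc1 if c % 2 == 0 else xc2).append(name); c += 1' — c stays nonnegative, so
-- PySem.Int.mod is exactly Python's %
def pvRoute (st : List String × List String × Int) (name : String) :
    List String × List String × Int :=
  if PySem.Int.mod st.2.2 2 = 0 then (st.1 ++ [name], st.2.1, st.2.2 + 1)
  else (st.1, st.2.1 ++ [name], st.2.2 + 1)

-- the 'for i, s in enumerate(x)' loop with state (xc1, xc2, c)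
def pvScan : List String → Int → (List String × List String × Int) →
    List String × List String × Int
  | [], _, st => st
  | s :: t, i, st =>
      let st1 := pvChampions.foldl (fun st champ =>
        if PySem.Str.isIn champ s then
          pvRoute st (if champ = "\"vi\"" then "vi" else champ)
        else st) st
      let st2 := if st1.2.2 < i + 1 then pvRoute st1 "nan" else st1
      pvScan t (i + 1) st2

def dpcleanup_alt (x : List String) : List String × List String :=
  let st := pvScan x 0 ([], [], 0)
  -- if len(xc2) < len(xc1): xc1.pop()
  let xc1 := if st.2.1.length < st.1.length then st.1.dropLast else st.1
  (xc1, st.2.1)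

-- ===== PRECONDITION & SPEC =====
def Spec_dpcleanup (x : List String) (out : List String × List String) : Prop := out = dpcleanup_alt x
instance (x : List String) (out : List String × List String) : Decidable (Spec_dpcleanup x out) := by unfold Spec_dpcleanup; infer_instance

-- ===== CLAIM (what is proved, stated in full; the proofs are below) =====
def Claim_equal_dpcleanup : Prop := ∀ (x : List String), Dom_dpcleanup x → Spec_dpcleanup x (dpcleanup x)

-- ===== LEMMAS AND PROOFS =====

-- the renamed champion matches of one string, in champions order
def pvMatches (s : String) : List String :=
  (pvChampions.filter (fun c => PySem.Str.isIn c s)).map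
    (fun c => if c = "\"vi\"" then "vi" else c)

-- the flat token stream A accumulates as xc: matches of each element plus the pad
def pvHits : List String → Int → Int → List String
  | [], _, _ => []
  | s :: t, i, n =>
      let h := pvMatches s
      let n' := n + h.length
      if n' ≤ i then h ++ "nan" :: pvHits t (i + 1) (n' + 1)
      else h ++ pvHits t (i + 1) n'

-- consecutive pairs of a list (odd trailing item dropped)
def pvPairUp : List String → List (String × String)
  | a :: b :: t => (a, b) :: pvPairUp t
  | _ => []

-- even- and odd-position sublists
def evensL : List String → List String
  | [] => []
  | [a] => [a]
  | a :: _ :: t => a :: evensL t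

def oddsL : List String → List String
  | [] => []
  | [_] => []
  | _ :: b :: t => b :: oddsL t

lemma evensL_snoc (xs : List String) (n : String) :
    evensL (xs ++ [n]) = if xs.length % 2 = 0 then evensL xs ++ [n] else evensL xs := by
  induction xs using evensL.induct with
  | case1 => simp [evensL]
  | case2 a => simp [evensL]
  | case3 a b t ih =>
      simp only [List.cons_append, evensL, ih, List.length_cons]
      by_cases h : t.length % 2 = 0
      · rw [if_pos h, if_pos (by omega)]
      · rw [if_neg h, if_neg (by omega)]

lemma oddsL_snoc (xs : List String) (n : String) :
    oddsL (xs ++ [n]) = if xs.length % 2 = 0 then oddsL xs else oddsL xs ++ [n] := by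
  induction xs using oddsL.induct with
  | case1 => simp [oddsL]
  | case2 a => simp [oddsL]
  | case3 a b t ih =>
      simp only [List.cons_append, oddsL, ih, List.length_cons]
      by_cases h : t.length % 2 = 0
      · rw [if_pos h, if_pos (by omega)]
      · rw [if_neg h, if_neg (by omega)]

-- pvRoute on the canonical state (evens, odds, length) appends to the flat stream
lemma route_canon (f : List String) (n : String) :
    pvRoute (evensL f, oddsL f, (f.length : Int)) n
      = (evensL (f ++ [n]), oddsL (f ++ [n]), ((f ++ [n]).length : Int)) := by
  unfold pvRoute
  have hm : PySem.Int.mod (f.length : Int) 2 = ((f.length % 2 : Nat) : Int) := by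
    rw [PySem.Int.mod_eq_emod_of_pos (by omega)]
    omega
  by_cases h : f.length % 2 = 0
  · rw [if_pos (by rw [hm, h]; rfl), evensL_snoc, oddsL_snoc, if_pos h, if_pos h]
    simp
  · rw [if_neg (by rw [hm]; omega), evensL_snoc, oddsL_snoc, if_neg h, if_neg h]
    simp

-- folding pvRoute over a name list extends the flat stream
lemma route_fold : ∀ (names f : List String),
    names.foldl pvRoute (evensL f, oddsL f, (f.length : Int))
      = (evensL (f ++ names), oddsL (f ++ names), ((f ++ names).length : Int)) := by
  intro names
  induction names with
  | nil => intro f; simp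
  | cons n t ih =>
      intro f
      rw [List.foldl_cons, route_canon, ih (f ++ [n])]
      simp

-- B's inner champion loop is a pvRoute-fold over pvMatches
lemma innerB_eq (s : String) : ∀ (cs : List String) (st : List String × List String × Int),
    cs.foldl (fun st champ =>
      if PySem.Str.isIn champ s then
        pvRoute st (if champ = "\"vi\"" then "vi" else champ)
      else st) st
    = ((cs.filter (fun c => PySem.Str.isIn c s)).map
        (fun c => if c = "\"vi\"" then "vi" else c)).foldl pvRoute st := by
  intro cs
  induction cs with
  | nil => intro st; rfl
  | cons c t ih =>
      intro st
      rw [List.foldl_cons, List.filter_cons]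
      by_cases hc : PySem.Str.isIn c s = true
      · rw [if_pos hc, if_pos hc, List.map_cons, List.foldl_cons, ih]
      · rw [if_neg hc, if_neg hc, ih]

-- B's scan maintains (evens, odds, length) of the flat stream A would build
lemma scan_eq : ∀ (xs : List String) (k : Nat) (f : List String),
    pvScan xs (k : Int) (evensL f, oddsL f, (f.length : Int))
      = (evensL (f ++ pvHits xs (k : Int) (f.length : Int)),
         oddsL (f ++ pvHits xs (k : Int) (f.length : Int)),
         ((f ++ pvHits xs (k : Int) (f.length : Int)).length : Int)) := by
  intro xs
  induction xs with
  | nil => intro k f; simp [pvScan, pvHits]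
  | cons s t ih =>
      intro k f
      rw [pvScan, innerB_eq]
      rw [show ((pvChampions.filter (fun c => PySem.Str.isIn c s)).map
            (fun c => if c = "\"vi\"" then "vi" else c)) = pvMatches s from rfl,
          route_fold (pvMatches s) f]
      rw [pvHits]
      have hL : (f.length : Int) + ((pvMatches s).length : Int)
          = ((f ++ pvMatches s).length : Int) := by simp
      simp only [hL]
      by_cases hpad : ((f ++ pvMatches s).length : Int) < (k : Int) + 1
      · rw [if_pos hpad, if_pos (by omega), route_canon]
        have hih := ih (k + 1) ((f ++ pvMatches s) ++ ["nan"])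
        push_cast at hih
        rw [hih]
        have hL2 : ((f ++ pvMatches s).length : Int) + 1
            = (((f ++ pvMatches s) ++ ["nan"]).length : Int) := by simp; omega
        simp only [hL2, List.append_assoc, List.cons_append, List.nil_append]
        all_goals omega
      · rw [if_neg hpad, if_neg (by omega)]
        have hih := ih (k + 1) (f ++ pvMatches s)
        push_cast at hih
        rw [hih]
        simp only [List.append_assoc]

-- A's inner champion loop appends exactly pvMatches
lemma inner_eq (s : String) : ∀ (cs : List String) (xc : List String),
    cs.foldl (fun xc champ =>
      if PySem.Str.isIn champ s then
        if champ = "\"vi\"" then xc ++ ["vi"] else xc ++ [champ]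
      else xc) xc
    = xc ++ ((cs.filter (fun c => PySem.Str.isIn c s)).map
        (fun c => if c = "\"vi\"" then "vi" else c)) := by
  intro cs
  induction cs with
  | nil => simp
  | cons c t ih =>
      intro xc
      rw [List.foldl_cons, List.filter_cons]
      by_cases hc : PySem.Str.isIn c s = true
      · rw [if_pos hc, if_pos hc, List.map_cons, ih]
        by_cases hv : c = "\"vi\""
        · rw [if_pos hv, if_pos hv]
          simp [List.append_assoc]
        · rw [if_neg hv, if_neg hv]
          simp [List.append_assoc]
      · rw [if_neg hc, if_neg hc, ih]

-- A's first loop, with the inner champion fold rewritten by inner_eq: started at index k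
-- with accumulator xc it emits xc ++ the hits of the remaining suffix
lemma xc_eq_hits (x : List String) : ∀ (suf : List String) (k : Nat) (xc : List String),
    x.drop k = suf →
    (PySem.List.pyRange (k : Int) (x.length : Int) 1).foldl (fun xc i =>
      let xc := xc ++ ((pvChampions.filter (fun c => PySem.Str.isIn c (PySem.List.pyGetD x i ""))).map
        (fun c => if c = "\"vi\"" then "vi" else c))
      if (xc.length : Int) < i + 1 then xc ++ ["nan"] else xc) xc
    = xc ++ pvHits suf (k : Int) (xc.length : Int) := by
  intro suf
  induction suf with
  | nil =>
      intro k xc hd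
      have hlen : x.length ≤ k := by
        have := congrArg List.length hd
        simp at this; omega
      rw [PySem.List.pyRange_one_eq_nil (by exact_mod_cast hlen)]
      simp [pvHits]
  | cons s t ih =>
      intro k xc hd
      have hk : k < x.length := by
        have := congrArg List.length hd
        simp at this; omega
      have hget : PySem.List.pyGetD x (k : Int) "" = s := by
        rw [PySem.List.pyGetD_natCast, List.getD_eq_getElem x "" (by exact_mod_cast hk)]
        have h0 : (x.drop k)[0]'(by rw [hd]; simp) = s := by
          simp [hd]
        simpa using h0
      rw [PySem.List.pyRange_one_cons (by exact_mod_cast hk), List.foldl_cons]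
      have hd' : x.drop (k + 1) = t := by
        have h1 : (x.drop k).tail = t := by rw [hd]; rfl
        rw [← List.tail_drop]
        exact h1
      simp only [hget]
      rw [pvHits]
      simp only [pvMatches]
      by_cases hpad : ((xc ++ ((pvChampions.filter (fun c => PySem.Str.isIn c s)).map
      (fun c => if c = "\"vi\"" then "vi" else c))).length : Int) < (k : Int) + 1
      · rw [if_pos hpad]
        have := ih (k + 1)
          (xc ++ ((pvChampions.filter (fun c => PySem.Str.isIn c s)).map
            (fun c => if c = "\"vi\"" then "vi" else c)) ++ ["nan"]) hd'
        push_cast at this ⊢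
        rw [this, if_pos (by simp only [List.length_append, List.length_map] at hpad ⊢; push_cast at hpad ⊢; omega)]
        simp only [List.append_assoc, List.length_append, List.length_map, List.cons_append,
          List.nil_append, List.length_cons, List.length_nil]
        push_cast
        ring_nf
      · rw [if_neg hpad]
        have := ih (k + 1)
          (xc ++ ((pvChampions.filter (fun c => PySem.Str.isIn c s)).map
            (fun c => if c = "\"vi\"" then "vi" else c))) hd'
        push_cast at this ⊢
        rw [this, if_neg (by simp only [List.length_append, List.length_map] at hpad ⊢; push_cast at hpad ⊢; omega)]
        simp only [List.append_assoc, List.length_append, List.length_map, List.cons_append,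
          List.nil_append, List.length_cons, List.length_nil]
        push_cast
        ring_nf

-- A's split loop, started at index j with accumulator acc, appends the pair columns of the rest
lemma split_eq_pairUp : ∀ (ys : List String) (xc : List String) (j : Nat)
    (acc : List String × List String), xc.drop (2 * j) = ys →
    (PySem.List.pyRange (j : Int) ((xc.length : Int) / 2) 1).foldl
      (fun (p : List String × List String) i =>
        (p.1 ++ [PySem.List.pyGetD xc (2 * i) ""], p.2 ++ [PySem.List.pyGetD xc (2 * i + 1) ""]))
      acc
    = (acc.1 ++ (pvPairUp ys).map Prod.fst, acc.2 ++ (pvPairUp ys).map Prod.snd) := by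
  intro ys
  induction ys using pvPairUp.induct with
  | case1 a b t ih =>
      intro xc j acc hd
      have hlen : 2 * j + 2 ≤ xc.length := by
        have := congrArg List.length hd
        simp at this; omega
      have hj : (j : Int) < (xc.length : Int) / 2 := by omega
      have hga : PySem.List.pyGetD xc (2 * (j : Int)) "" = a := by
        rw [show (2 * (j : Int)) = ((2 * j : Nat) : Int) by push_cast; ring]
        rw [PySem.List.pyGetD_natCast, List.getD_eq_getElem xc "" (by omega)]
        have h0 : (xc.drop (2 * j))[0]'(by rw [hd]; simp) = a := by simp [hd]
        simpa using h0
      have hgb : PySem.List.pyGetD xc (2 * (j : Int) + 1) "" = b := by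
        rw [show (2 * (j : Int) + 1) = ((2 * j + 1 : Nat) : Int) by push_cast; ring]
        rw [PySem.List.pyGetD_natCast, List.getD_eq_getElem xc "" (by omega)]
        have h1 : (xc.drop (2 * j))[1]'(by rw [hd]; simp) = b := by simp [hd]
        simpa using h1
      rw [PySem.List.pyRange_one_cons hj, List.foldl_cons]
      have hd' : xc.drop (2 * (j + 1)) = t := by
        have h2 : ((xc.drop (2 * j)).drop 2) = t := by rw [hd]; rfl
        rw [List.drop_drop] at h2
        rw [show 2 * (j + 1) = 2 * j + 2 by ring]
        exact h2
      have := ih xc (j + 1) (acc.1 ++ [PySem.List.pyGetD xc (2 * (j : Int)) ""],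
        acc.2 ++ [PySem.List.pyGetD xc (2 * (j : Int) + 1) ""]) hd'
      push_cast at this ⊢
      rw [this, hga, hgb, pvPairUp]
      simp [List.append_assoc]
  | case2 ys h2 =>
      intro xc j acc hd
      have hlen : xc.length ≤ 2 * j + 1 := by
        have hll := congrArg List.length hd
        simp at hll
        rcases ys with _ | ⟨a, _ | ⟨b, t⟩⟩
        · simp at hll; omega
        · simp at hll; omega
        · exact absurd rfl (h2 a b t)
      rw [PySem.List.pyRange_one_eq_nil (by omega)]
      rcases ys with _ | ⟨a, _ | ⟨b, t⟩⟩
      · simp [pvPairUp]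
      · simp [pvPairUp]
      · exact absurd rfl (h2 a b t)

-- first column of the pairing = evens, trimmed exactly when odds is shorter
lemma pairUp_fst : ∀ (h : List String),
    (pvPairUp h).map Prod.fst
      = if (oddsL h).length < (evensL h).length then (evensL h).dropLast else evensL h := by
  intro h
  induction h using pvPairUp.induct with
  | case1 a b t ih =>
      rw [pvPairUp, List.map_cons, ih]
      show a :: _ = if (b :: oddsL t).length < (a :: evensL t).length then _ else _
      by_cases hc : (oddsL t).length < (evensL t).length
      · rw [if_pos hc, if_pos (by simp; omega)]
        have hne : evensL t ≠ [] := by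
          intro hnil; rw [hnil] at hc; simp at hc
        show a :: (evensL t).dropLast = (a :: evensL t).dropLast
        rw [List.dropLast_cons_of_ne_nil hne]
      · rw [if_neg hc, if_neg (by simp; omega)]
        rfl
  | case2 ys h2 =>
      rcases ys with _ | ⟨a, _ | ⟨b, t⟩⟩
      · simp [pvPairUp, evensL, oddsL]
      · simp [pvPairUp, evensL, oddsL]
      · exact absurd rfl (h2 a b t)

-- second column of the pairing = odds
lemma pairUp_snd : ∀ (h : List String), (pvPairUp h).map Prod.snd = oddsL h := by
  intro h
  induction h using pvPairUp.induct with
  | case1 a b t ih =>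
      rw [pvPairUp, List.map_cons, ih]
      rfl
  | case2 ys h2 =>
      rcases ys with _ | ⟨a, _ | ⟨b, t⟩⟩
      · rfl
      · rfl
      · exact absurd rfl (h2 a b t)

-- ===== VERDICT (by name: the statement is the Claim_ definition above) =====
theorem dpcleanup_spec : Claim_equal_dpcleanup := by
  intro x _
  unfold Spec_dpcleanup dpcleanup dpcleanup_alt dpcleanupXc
  have hfun : (fun (xc : List String) (i : Int) =>
      let xc := pvChampions.foldl (fun xc champ =>
        if PySem.Str.isIn champ (PySem.List.pyGetD x i "") then
          if champ = "\"vi\"" then xc ++ ["vi"] else xc ++ [champ]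
        else xc) xc
      if (xc.length : Int) < i + 1 then xc ++ ["nan"] else xc)
    = (fun (xc : List String) (i : Int) =>
      let xc := xc ++ ((pvChampions.filter (fun c => PySem.Str.isIn c (PySem.List.pyGetD x i ""))).map
        (fun c => if c = "\"vi\"" then "vi" else c))
      if (xc.length : Int) < i + 1 then xc ++ ["nan"] else xc) := by
    funext xc i
    simp only [inner_eq]
  rw [hfun]
  have h1 := xc_eq_hits x x 0 [] (by simp)
  push_cast [List.length_nil] at h1
  rw [h1]
  simp only [List.nil_append]
  have h2 := split_eq_pairUp (pvHits x 0 0) (pvHits x 0 0) 0 ([], []) (by simp)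
  push_cast at h2
  rw [h2]
  have h3 := scan_eq x 0 []
  simp only [List.length_nil, Nat.cast_zero, List.nil_append] at h3
  show (_, _) = _
  rw [show evensL [] = [] from rfl, show oddsL [] = [] from rfl] at h3
  rw [h3]
  simp only [List.nil_append]
  rw [pairUp_fst, pairUp_snd]
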